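-- pv_equiv track=rewrite | github.com/qe-team/marmot | marmot/features/word2vec_feature_extractor.py | right_context
-- ===== SOURCE A (Python) =====
-- def right_context(token_list, token, context_size, idx):
--     right_window = []
--     if idx >= len(token_list):
--         #return ['_END_' for i in range(context_size)]
--         return ['</s>' for i in range(context_size)]
--     assert(token_list[idx] == token), "Token in token list: {}, index: {}, token provided in parameters: {}".format(token_list[idx], idx, token)
--     for i in range(idx+1, idx+context_size+1):
--         if i > len(token_list)-1:
--             #right_window.append('_END_')
--             right_window.append('</s>')
--         else:
--             right_window.append(token_list[i])
--     return right_window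
-- ===== SOURCE B (Python) =====
-- def right_context(token_list, token, context_size, idx):
--     if idx >= len(token_list):
--         return ['</s>'] * context_size
--     assert(token_list[idx] == token), "Token in token list: {}, index: {}, token provided in parameters: {}".format(token_list[idx], idx, token)
--     actual = token_list[idx+1 : idx+context_size+1]
--     return actual + ['</s>'] * (context_size - len(actual))
-- ===== Notes on version B (the rewrite author's own statement) =====
-- stated objective: simpler
-- what changed: Replaces the index loop with its per-element bounds check by a slice of the in-range tokens followed by arithmetic padding with '</s>'.
-- outside the precondition, e.g. on right_context(['a', 'b'], 'a', 2, -2): A returns ['b', 'a'], B returns ['</s>', '</s>']; on right_context(['a', 'b', 'c', 'd'], 'a', -3, 0): A returns [], B returns ['b']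
import Mathlib
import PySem

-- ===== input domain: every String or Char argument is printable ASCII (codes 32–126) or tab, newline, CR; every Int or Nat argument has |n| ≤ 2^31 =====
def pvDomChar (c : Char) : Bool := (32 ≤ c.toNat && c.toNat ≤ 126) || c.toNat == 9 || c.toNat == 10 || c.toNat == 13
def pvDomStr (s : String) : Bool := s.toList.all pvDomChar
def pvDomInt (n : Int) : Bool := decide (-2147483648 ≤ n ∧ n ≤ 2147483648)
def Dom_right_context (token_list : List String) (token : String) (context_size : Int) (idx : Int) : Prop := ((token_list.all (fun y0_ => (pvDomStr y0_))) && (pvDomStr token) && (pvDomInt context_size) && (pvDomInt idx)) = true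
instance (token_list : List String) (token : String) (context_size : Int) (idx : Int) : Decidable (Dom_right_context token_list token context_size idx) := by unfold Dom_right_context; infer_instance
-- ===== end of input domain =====

-- B replaces the per-element bounds-checked index loop by a slice of the in-range
-- tokens plus arithmetic padding with '</s>' (objective: simpler).

-- ===== PORT A =====
-- literal transliteration of A; the assert holds on every input admitted by Pre_
def right_context (token_list : List String) (token : String) (context_size : Int) (idx : Int) : List String :=
  if idx ≥ PySem.List.len token_list then
    (PySem.List.pyRange 0 context_size 1).map (fun _ => "</s>")
  else
    (PySem.List.pyRange (idx + 1) (idx + context_size + 1) 1).foldl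
      (fun right_window i =>
        if i > PySem.List.len token_list - 1 then right_window ++ ["</s>"]
        else right_window ++ [PySem.List.pyGetD token_list i ""]) []

-- ===== PORT B =====
def right_context_alt (token_list : List String) (token : String) (context_size : Int) (idx : Int) : List String :=
  if idx ≥ PySem.List.len token_list then
    PySem.List.pyRepeat ["</s>"] context_size
  else
    let actual := PySem.List.slice token_list (some (idx + 1)) (some (idx + context_size + 1))
    actual ++ PySem.List.pyRepeat ["</s>"] (context_size - PySem.List.len actual)

-- ===== PRECONDITION & SPEC =====
-- Pre_ excludes inputs where A's assert fails or an IndexError is raised, and inputs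
-- whose window A builds through negative-index wraparound and lets it cross from
-- negative to non-negative positions (idx ≤ -2 with idx + context_size ≥ -1, or
-- negative context_size with idx in range), on which A's values are accidents of
-- Python's negative indexing that B's slice-and-pad does not reproduce.
def Pre_right_context (token_list : List String) (token : String) (context_size : Int) (idx : Int) : Prop :=
  PySem.List.len token_list ≤ idx ∨
    (PySem.List.pyGet? token_list idx = some token ∧
      ((0 ≤ context_size ∧ (-1 ≤ idx ∨ idx + context_size ≤ -2)) ∨ context_size = 0))
instance (token_list : List String) (token : String) (context_size : Int) (idx : Int) : Decidable (Pre_right_context token_list token context_size idx) := by unfold Pre_right_context; infer_instance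

def pvWitness_right_context : List String × String × Int × Int := (["a", "b"], "a", 2, 0)

def Spec_right_context (token_list : List String) (token : String) (context_size : Int) (idx : Int) (out : List String) : Prop := out = right_context_alt token_list token context_size idx
instance (token_list : List String) (token : String) (context_size : Int) (idx : Int) (out : List String) : Decidable (Spec_right_context token_list token context_size idx out) := by unfold Spec_right_context; infer_instance

-- ===== CLAIM (what is proved, stated in full; the proofs are below) =====
def Claim_equal_right_context : Prop := ∀ (token_list : List String) (token : String) (context_size : Int) (idx : Int), Dom_right_context token_list token context_size idx → Pre_right_context token_list token context_size idx → Spec_right_context token_list token context_size idx (right_context token_list token context_size idx)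

-- ===== LEMMAS AND PROOFS =====

-- the core identity on Nat indices: the bounds-checked window over positions
-- a, a+1, …, a+n-1 equals slice-then-pad
lemma window_eq_slice_pad (tl : List String) (d e : String) :
    ∀ (n a : Nat),
      (List.range n).map (fun k => if tl.length ≤ a + k then d else tl.getD (a + k) e)
        = (tl.drop a).take n ++ List.replicate (n - ((tl.drop a).take n).length) d := by
  intro n
  induction n with
  | zero => intro a; simp
  | succ n ih =>
    intro a
    rw [List.range_succ_eq_map, List.map_cons, List.map_map]
    have hshift : ((fun k => if tl.length ≤ a + k then d else tl.getD (a + k) e) ∘ Nat.succ)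
        = (fun k => if tl.length ≤ (a + 1) + k then d else tl.getD ((a + 1) + k) e) := by
      funext k
      simp only [Function.comp]
      rw [show a + Nat.succ k = (a + 1) + k from by omega]
    rw [hshift, ih (a + 1)]
    by_cases h : tl.length ≤ a
    · have hd : tl.drop a = ([] : List String) := List.drop_eq_nil_of_le h
      have hd' : tl.drop (a + 1) = ([] : List String) := List.drop_eq_nil_of_le (by omega)
      rw [hd, hd', if_pos (show tl.length ≤ a + 0 from by omega)]
      simp [List.replicate_succ]
    · push_neg at h
      have hd : tl.drop a = tl[a] :: tl.drop (a + 1) := List.drop_eq_getElem_cons h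
      rw [hd, if_neg (show ¬ tl.length ≤ a + 0 from by omega), List.take_succ_cons]
      simp [List.length_cons, List.getElem?_eq_getElem h]


lemma slice_neg_neg (xs : List String) (a b : Int) (ha : a < 0) (hb : b < 0) :
    PySem.List.slice xs (some a) (some b)
      = (xs.drop (xs.length - (-a).toNat)).take ((xs.length - (-b).toNat) - (xs.length - (-a).toNat)) := by
  unfold PySem.List.slice
  simp only []
  rw [show a = -(((-a).toNat : Nat) : Int) from by omega,
      show b = -(((-b).toNat : Nat) : Int) from by omega,
      PySem.List.clampIdx_neg_natCast _ _ (by omega), PySem.List.clampIdx_neg_natCast _ _ (by omega)]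
  simp only [neg_neg, Int.toNat_natCast]

lemma pyGetD_neg (tl : List String) (i : Int) (h1 : -(tl.length : Int) ≤ i) (h2 : i < 0) :
    PySem.List.pyGetD tl i "" = tl.getD ((tl.length : Int) + i).toNat "" := by
  unfold PySem.List.pyGetD PySem.List.pyGet? PySem.List.pyIdx?
  split
  · omega
  · simp only [Option.bind]
    rw [List.getElem?_eq_getElem (by omega), List.getD_eq_getElem _ _ (by omega)]
    simp only [Option.getD_some]
    congr 1
    omega

lemma neg_window_case (tl : List String) (cs idx : Int) (hcs : 0 ≤ cs)
    (hw : idx + cs ≤ -2) (hb : -(tl.length : Int) ≤ idx) :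
    (PySem.List.pyRange (idx + 1) (idx + cs + 1) 1).map
        (fun i => if i > PySem.List.len tl - 1 then "</s>" else PySem.List.pyGetD tl i "")
      = PySem.List.slice tl (some (idx + 1)) (some (idx + cs + 1)) ++
          PySem.List.pyRepeat ["</s>"]
            (cs - PySem.List.len (PySem.List.slice tl (some (idx + 1)) (some (idx + cs + 1)))) := by
  have hlen2 : 2 ≤ (tl.length : Int) := by omega
  -- the slice in drop/take form
  rw [slice_neg_neg tl (idx + 1) (idx + cs + 1) (by omega) (by omega)]
  have hA0 : tl.length - (-(idx + 1)).toNat = ((tl.length : Int) + idx + 1).toNat := by omega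
  rw [hA0]
  have hN : tl.length - (-(idx + cs + 1)).toNat - ((tl.length : Int) + idx + 1).toNat = cs.toNat := by omega
  rw [hN]
  -- the loop in window form
  have hmap : (PySem.List.pyRange (idx + 1) (idx + cs + 1) 1).map
        (fun i => if i > PySem.List.len tl - 1 then "</s>" else PySem.List.pyGetD tl i "")
      = (List.range cs.toNat).map
          (fun k => if tl.length ≤ ((tl.length : Int) + idx + 1).toNat + k then "</s>"
            else tl.getD (((tl.length : Int) + idx + 1).toNat + k) "") := by
    rw [PySem.List.pyRange_one, List.map_map]
    have hn : (idx + cs + 1 - (idx + 1)).toNat = cs.toNat := by omega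
    rw [hn]
    refine List.map_congr_left ?_
    intro k hk
    simp only [List.mem_range] at hk
    simp only [Function.comp]
    rw [if_neg (by simp only [PySem.List.len]; omega),
        if_neg (by omega),
        pyGetD_neg tl (idx + 1 + k) (by omega) (by omega)]
    congr 1
    omega
  rw [hmap, window_eq_slice_pad tl "</s>" "" cs.toNat (((tl.length : Int)) + idx + 1).toNat]
  have hfull : (List.take cs.toNat (List.drop ((tl.length : Int) + idx + 1).toNat tl)).length = cs.toNat := by
    simp only [List.length_take, List.length_drop]
    omega
  rw [hfull]
  have hz : cs - (PySem.List.len (List.take cs.toNat (List.drop ((tl.length : Int) + idx + 1).toNat tl))) = 0 := by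
    simp only [PySem.List.len, hfull]
    omega
  rw [hz]
  simp [PySem.List.pyRepeat]

-- A's loop over pyRange (idx+1) (idx+cs+1), rewritten to the Nat form above
lemma loopA_eq (tl : List String) (a b : Int) (h0 : 0 ≤ a) :
    (PySem.List.pyRange a b 1).map
        (fun i => if i > PySem.List.len tl - 1 then "</s>" else PySem.List.pyGetD tl i "")
      = (List.range (b - a).toNat).map
          (fun k => if tl.length ≤ a.toNat + k then "</s>" else tl.getD (a.toNat + k) "") := by
  rw [PySem.List.pyRange_one, List.map_map]
  refine List.map_congr_left ?_
  intro k hk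
  simp only [Function.comp, PySem.List.len]
  by_cases h : tl.length ≤ a.toNat + k
  · rw [if_pos (by omega), if_pos h]
  · push_neg at h
    rw [if_neg (by omega), if_neg (by omega),
        show a + (k : Int) = ((a.toNat + k : Nat) : Int) from by omega,
        PySem.List.pyGetD_natCast]

-- ===== VERDICT (by name: the statement is the Claim_ definition above) =====
theorem right_context_spec : Claim_equal_right_context := by
  intro tl token cs idx _ hpre
  unfold Spec_right_context right_context right_context_alt
  rcases hpre with hge | ⟨hget, hrest⟩
  · rw [if_pos hge, if_pos hge]
    rw [PySem.List.pyRange_one, List.map_map, PySem.List.pyRepeat_singleton]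
    simp [Function.comp_def]
  · have hlt : ¬ idx ≥ PySem.List.len tl := by
      intro h
      have : PySem.List.pyGet? tl idx = none := by
        simp only [PySem.List.len] at h
        unfold PySem.List.pyGet? PySem.List.pyIdx?
        split <;> simp_all <;> omega
      simp [this] at hget
    have hb : -(tl.length : Int) ≤ idx := by
      by_contra h
      have : PySem.List.pyGet? tl idx = none := by
        unfold PySem.List.pyGet? PySem.List.pyIdx?
        split <;> simp_all <;> omega
      simp [this] at hget
    rw [if_neg hlt, if_neg hlt]
    simp only [PySem.List.len, ge_iff_le, not_le] at hlt
    -- the loop body appends one element in either branch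
    have hbody : (fun (right_window : List String) (i : Int) =>
          if i > PySem.List.len tl - 1 then right_window ++ ["</s>"]
          else right_window ++ [PySem.List.pyGetD tl i ""])
        = (fun right_window i =>
          right_window ++ [if i > PySem.List.len tl - 1 then "</s>" else PySem.List.pyGetD tl i ""]) := by
      funext acc i; split <;> rfl
    rw [hbody, PySem.List.foldl_append_singleton_eq_map, List.nil_append]
    show _ = PySem.List.slice tl (some (idx + 1)) (some (idx + cs + 1)) ++
        PySem.List.pyRepeat ["</s>"]
          (cs - PySem.List.len (PySem.List.slice tl (some (idx + 1)) (some (idx + cs + 1))))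
    rcases hrest with ⟨hcs, hidx | hw⟩ | hcs0
    · -- window start is non-negative: slice and pad in drop/take form
      rw [loopA_eq tl (idx + 1) (idx + cs + 1) (by omega),
          window_eq_slice_pad tl "</s>" "" (idx + cs + 1 - (idx + 1)).toNat (idx + 1).toNat]
      rw [PySem.List.slice_toNat tl (by omega) (by omega), PySem.List.pyRepeat_singleton]
      congr 2
      · omega
      · simp only [PySem.List.len, List.length_take, List.length_drop]
        omega
    · -- window lies entirely in the negative range: wraparound agrees with the slice
      exact neg_window_case tl cs idx hcs hw hb
    · -- context_size = 0: the range is empty and the slice is empty, both sides are []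
      subst hcs0
      have hr : PySem.List.pyRange (idx + 1) (idx + 0 + 1) 1 = [] :=
        PySem.List.pyRange_one_eq_nil (by omega)
      have hsl : PySem.List.slice tl (some (idx + 1)) (some (idx + 0 + 1)) = [] :=
        List.eq_nil_of_length_eq_zero
          (by rw [PySem.List.length_slice, show idx + 0 + 1 = idx + 1 from by omega]; omega)
      rw [hr, hsl]
      simp [PySem.List.pyRepeat]
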